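-- pv_equiv track=rewrite | github.com/Aandree5/Chatbot-Jeff | what_Recog.py | reformatSentence
-- ===== SOURCE A (Python) =====
-- def reformatSentence(sentence, operatorType):
--     """reformats the sentence so we're left with just the equation"""
--     equation = ""
--     char = ""
--     if operatorType == "symbols": # this part runs if the equation is using + - * /
--         for i in sentence:
--             if i not in "what is ":
--                 char = i
--                 if char == "^":
--                     equation = equation + "**"
--                 else:
--                     equation = equation + char
--     elif operatorType == "words": # this part runs if the equation uses words, like "plus"
--         sentenceParce = sentence.split()
--         for i in sentenceParce:
--             if i == 'what' or i == 'is':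
--                 continue
--             else:
--                 equation = equation + " " + i
--         equationParce = equation.split()
--         equation = ""
--         for part in equationParce:
--             if part == "plus":
--                 equation = equation + "+"
--             elif part == "divided":
--                 equation = equation + "/"
--             elif part == "times" or part == "multipliedby":
--                 equation = equation + "*"
--             elif part == "power":
--                 equation = equation + "**"
--             elif part == "minus":
--                 equation = equation + "-"
--             elif part in ["by","to","the","of"]:
--                 continue
--             else:
--                 equation = equation + part
--     return equation
-- ===== SOURCE B (Python) =====
-- def reformatSentence(sentence, operatorType):
--     """reformats the sentence so we're left with just the equation"""
--     if operatorType == "symbols":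
--         return "".join("**" if i == "^" else i
--                        for i in sentence if i not in "what is ")
--     elif operatorType == "words":
--         ops = {"plus": "+", "divided": "/", "times": "*",
--                "multipliedby": "*", "power": "**", "minus": "-"}
--         skip = {"what", "is", "by", "to", "the", "of"}
--         return "".join(ops.get(tok, tok)
--                        for tok in sentence.split() if tok not in skip)
--     return ""
-- ===== Notes on version B (the rewrite author's own statement) =====
-- stated objective: simpler
-- what changed: The words branch's two sequential passes (build a spaced string from the filtered tokens, re-split it, then translate operator words) are replaced by one filter-and-translate pass over sentence.split() using a dict for the operator words and a set for the skip words; the symbols branch becomes a filter+map+join instead of string accumulation.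
import Mathlib
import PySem

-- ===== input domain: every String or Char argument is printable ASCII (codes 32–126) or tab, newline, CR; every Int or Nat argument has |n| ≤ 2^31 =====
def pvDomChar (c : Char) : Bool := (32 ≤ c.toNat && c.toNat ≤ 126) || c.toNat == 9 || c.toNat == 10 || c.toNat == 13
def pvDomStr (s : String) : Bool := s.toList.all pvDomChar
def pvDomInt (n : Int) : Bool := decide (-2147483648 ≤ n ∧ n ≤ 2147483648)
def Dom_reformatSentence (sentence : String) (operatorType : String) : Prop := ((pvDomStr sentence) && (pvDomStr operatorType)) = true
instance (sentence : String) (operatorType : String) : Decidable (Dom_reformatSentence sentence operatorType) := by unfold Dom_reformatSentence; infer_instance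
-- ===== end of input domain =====

-- B replaces A's build-string-then-re-split word pass with one token-level
-- filter-and-translate pass over sentence.split() (objective: simpler).

-- ===== PORT A =====
-- Port of A on code points (List Char) via PySem.Chars; each Python loop is a foldl over the same accumulator.
def reformatSentence (sentence : String) (operatorType : String) : String :=
  if operatorType = "symbols" then
    -- for i in sentence: if i not in "what is ": char = i; '^' → "**" else char
    String.ofList <| sentence.toList.foldl (fun equation i =>
      if !(PySem.Chars.isIn [i] ("what is ".toList)) then
        let char := i
        if char = '^' then equation ++ "**".toList else equation ++ [char]
      else equation) []
  else if operatorType = "words" then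
    let sentenceParce := PySem.Chars.split₀ sentence.toList
    -- first pass: drop 'what'/'is', rebuild a spaced string
    let equation := sentenceParce.foldl (fun equation i =>
      if i = "what".toList ∨ i = "is".toList then equation
      else equation ++ " ".toList ++ i) []
    -- second pass: re-split and translate operator words
    let equationParce := PySem.Chars.split₀ equation
    String.ofList <| equationParce.foldl (fun equation part =>
      if part = "plus".toList then equation ++ "+".toList
      else if part = "divided".toList then equation ++ "/".toList
      else if part = "times".toList ∨ part = "multipliedby".toList then equation ++ "*".toList
      else if part = "power".toList then equation ++ "**".toList
      else if part = "minus".toList then equation ++ "-".toList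
      else if part ∈ ["by".toList, "to".toList, "the".toList, "of".toList] then equation
      else equation ++ part) []
  else ""

-- ===== PORT B =====
-- B's operator-word table (Python dict 'ops') and skip set, as in Source B.
def pvOps : PySem.Dict (List Char) (List Char) :=
  PySem.Dict.mk [("plus".toList, "+".toList), ("divided".toList, "/".toList),
                 ("times".toList, "*".toList), ("multipliedby".toList, "*".toList),
                 ("power".toList, "**".toList), ("minus".toList, "-".toList)]

def pvSkip : PySem.Set (List Char) :=
  PySem.Set.ofList ["what".toList, "is".toList, "by".toList, "to".toList, "the".toList, "of".toList]

-- Port of B: symbols = filter+map+join; words = one filter-and-translate pass over split().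
def reformatSentence_alt (sentence : String) (operatorType : String) : String :=
  if operatorType = "symbols" then
    PySem.Str.join "" ((sentence.toList.filter
        (fun i => !(PySem.Chars.isIn [i] ("what is ".toList)))).map
      (fun i => if i = '^' then "**" else String.ofList [i]))
  else if operatorType = "words" then
    PySem.Str.join "" (((PySem.Chars.split₀ sentence.toList).filter
        (fun tok => !(PySem.Set.contains pvSkip tok))).map
      (fun tok => String.ofList (pvOps.getD tok tok)))
  else ""

-- ===== PRECONDITION & SPEC =====
def Spec_reformatSentence (sentence : String) (operatorType : String) (out : String) : Prop := out = reformatSentence_alt sentence operatorType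
instance (sentence : String) (operatorType : String) (out : String) : Decidable (Spec_reformatSentence sentence operatorType out) := by unfold Spec_reformatSentence; infer_instance

-- ===== CLAIM (what is proved, stated in full; the proofs are below) =====
def Claim_equal_reformatSentence : Prop := ∀ (sentence : String) (operatorType : String), Dom_reformatSentence sentence operatorType → Spec_reformatSentence sentence operatorType (reformatSentence sentence operatorType)

-- ===== LEMMAS AND PROOFS =====

-- a "skip-or-append" fold is the flattened map over the filtered list
theorem pv_foldl_if {α : Type} (p : α → Bool) (g : α → List Char) :
    ∀ (l : List α) (acc : List Char),
      l.foldl (fun e x => if p x then e ++ g x else e) acc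
        = acc ++ ((l.filter p).map g).flatten := by
  intro l
  induction l with
  | nil => intro acc; simp
  | cons x t ih =>
    intro acc
    by_cases h : p x = true <;> simp [h, ih]

-- an "always-append" fold is the flattened map
theorem pv_foldl_app {α : Type} (g : α → List Char) :
    ∀ (l : List α) (acc : List Char),
      l.foldl (fun e x => e ++ g x) acc = acc ++ (l.map g).flatten := by
  intro l
  induction l with
  | nil => intro acc; simp
  | cons x t ih => intro acc; simp [ih]

-- tokens whose contribution is [] can be filtered out before flattening
theorem pv_flatten_filter {α : Type} (q : α → Bool) (g : α → List Char)
    (hq : ∀ x, q x = false → g x = []) :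
    ∀ (l : List α), (l.map g).flatten = ((l.filter q).map g).flatten := by
  intro l
  induction l with
  | nil => simp
  | cons x t ih =>
    by_cases h : q x = true
    · simp [h, ih]
    · have := hq x (by simp_all)
      simp [h, this, ih]

-- split₀.go consumes a whitespace-free block onto cur
theorem pv_go_token (t : List Char) :
    ∀ (rest cur : List Char) (acc : List (List Char)),
      (∀ c ∈ t, PySem.Chars.isspace c = false) →
      PySem.Chars.split₀.go (t ++ rest) cur acc
        = PySem.Chars.split₀.go rest (t.reverse ++ cur) acc := by
  induction t with
  | nil => intro rest cur acc _; simp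
  | cons c t ih =>
    intro rest cur acc h
    have hc : PySem.Chars.isspace c = false := h c (by simp)
    rw [List.cons_append, PySem.Chars.split₀.go.eq_2, hc]
    simp only [Bool.false_eq_true, if_false]
    rw [ih rest (c :: cur) acc (fun d hd => h d (by simp [hd]))]
    simp

-- splitting the space-prefixed concatenation of good tokens returns the tokens
theorem pv_go_flat (ts : List (List Char)) :
    ∀ (cur : List Char) (acc : List (List Char)),
      (∀ t ∈ ts, t ≠ [] ∧ ∀ c ∈ t, PySem.Chars.isspace c = false) →
      PySem.Chars.split₀.go ((ts.map (fun t => ' ' :: t)).flatten) cur acc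
        = (if cur.isEmpty then acc.reverse else acc.reverse ++ [cur.reverse]) ++ ts := by
  induction ts with
  | nil =>
    intro cur acc _
    rw [List.map_nil, List.flatten_nil, PySem.Chars.split₀.go.eq_def]
    cases cur <;> simp
  | cons t ts ih =>
    intro cur acc h
    obtain ⟨hne, hns⟩ := h t (by simp)
    have hts : ∀ u ∈ ts, u ≠ [] ∧ ∀ c ∈ u, PySem.Chars.isspace c = false :=
      fun u hu => h u (by simp [hu])
    have hsp : PySem.Chars.isspace ' ' = true := by decide
    have htr : (t.reverse ++ ([] : List Char)).isEmpty = false := by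
      cases t with
      | nil => exact absurd rfl hne
      | cons a s => simp [List.isEmpty_eq_false_iff]
    rw [List.map_cons, List.flatten_cons, List.cons_append, PySem.Chars.split₀.go.eq_2, hsp]
    simp only [if_true]
    cases cur with
    | nil =>
      rw [List.isEmpty_nil, if_pos rfl, if_pos rfl, pv_go_token t _ [] acc hns, ih _ acc hts, htr]
      simp
    | cons a cur =>
      rw [List.isEmpty_cons, if_neg (by simp), if_neg (by simp),
        pv_go_token t _ [] _ hns, ih _ _ hts, htr]
      simp

-- every token produced by split₀ is nonempty and whitespace-free
theorem pv_go_good (s : List Char) :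
    ∀ (cur : List Char) (acc : List (List Char)),
      (∀ c ∈ cur, PySem.Chars.isspace c = false) →
      (∀ t ∈ acc, t ≠ [] ∧ ∀ c ∈ t, PySem.Chars.isspace c = false) →
      ∀ t ∈ PySem.Chars.split₀.go s cur acc,
        t ≠ [] ∧ ∀ c ∈ t, PySem.Chars.isspace c = false := by
  induction s with
  | nil =>
    intro cur acc hcur hacc t ht
    rw [PySem.Chars.split₀.go.eq_1] at ht
    cases cur with
    | nil => simp at ht; exact hacc t (by simpa using ht)
    | cons a c =>
      rw [List.isEmpty_cons, if_neg (by simp)] at ht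
      simp only [List.mem_reverse, List.mem_cons] at ht
      rcases ht with h | h
      · subst h
        refine ⟨by simp, fun d hd => hcur d ?_⟩
        rw [List.mem_reverse] at hd
        exact hd
      · exact hacc t h
  | cons c s ih =>
    intro cur acc hcur hacc t ht
    rw [PySem.Chars.split₀.go.eq_2] at ht
    by_cases hc : PySem.Chars.isspace c = true
    · rw [hc, if_pos rfl] at ht
      cases cur with
      | nil =>
        rw [List.isEmpty_nil, if_pos rfl] at ht
        exact ih [] acc (by simp) hacc t ht
      | cons a cu =>
        rw [List.isEmpty_cons, if_neg (by simp)] at ht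
        refine ih [] _ (by simp) ?_ t ht
        intro u hu
        rcases (by simpa using hu : u = (a :: cu).reverse ∨ u ∈ acc) with h | h
        · subst h
          refine ⟨by simp, fun d hd => hcur d ?_⟩
          rw [List.mem_reverse] at hd
          exact hd
        · exact hacc u h
    · rw [Bool.not_eq_true] at hc
      rw [hc] at ht
      simp only [Bool.false_eq_true, if_false] at ht
      refine ih (c :: cur) acc ?_ hacc t ht
      intro d hd
      rcases (by simpa using hd : d = c ∨ d ∈ cur) with h | h
      · subst h; exact hc
      · exact hcur d h

theorem pv_split_flat (ts : List (List Char))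
    (h : ∀ t ∈ ts, t ≠ [] ∧ ∀ c ∈ t, PySem.Chars.isspace c = false) :
    PySem.Chars.split₀ ((ts.map (fun t => ' ' :: t)).flatten) = ts := by
  unfold PySem.Chars.split₀
  rw [pv_go_flat ts [] [] h]
  simp

theorem pv_split_good (s : List Char) :
    ∀ t ∈ PySem.Chars.split₀ s, t ≠ [] ∧ ∀ c ∈ t, PySem.Chars.isspace c = false := by
  unfold PySem.Chars.split₀
  exact pv_go_good s [] [] (by simp) (by simp)

-- Chars.join with the empty separator is flatten
theorem pv_join_nil_sep (ps : List (List Char)) :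
    PySem.Chars.join [] ps = ps.flatten := by
  unfold PySem.Chars.join
  induction ps with
  | nil => simp [List.intercalate]
  | cons p ps ih =>
    cases ps with
    | nil => simp [List.intercalate]
    | cons q qs =>
      rw [List.flatten_cons, ← ih]
      simp [List.intercalate]

-- A's elif chain, written as one piece function
def pvPiece (part : List Char) : List Char :=
  if part = "plus".toList then "+".toList
  else if part = "divided".toList then "/".toList
  else if part = "times".toList ∨ part = "multipliedby".toList then "*".toList
  else if part = "power".toList then "**".toList
  else if part = "minus".toList then "-".toList
  else if part ∈ ["by".toList, "to".toList, "the".toList, "of".toList] then []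
  else part

theorem pv_skip_split (t : List Char) :
    (!(PySem.Set.contains pvSkip t))
      = ((!(decide (t = "what".toList ∨ t = "is".toList)))
          && !(decide (t ∈ ["by".toList, "to".toList, "the".toList, "of".toList]))) := by
  have : pvSkip = ["what".toList, "is".toList, "by".toList, "to".toList, "the".toList, "of".toList] := by
    unfold pvSkip
    exact PySem.Set.ofList_eq_self_of_nodup _ (by decide)
  rw [this]
  simp only [PySem.Set.contains_eq_listContains, List.contains_eq_mem]
  by_cases h1 : t = "what".toList
  · simp [h1]
  · by_cases h2 : t = "is".toList
    · simp [h2]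
    · simp [Bool.and_assoc]

theorem pv_piece_eq_getD (t : List Char)
    (h : ¬ t ∈ ["by".toList, "to".toList, "the".toList, "of".toList]) :
    pvPiece t = pvOps.getD t t := by
  unfold pvPiece pvOps PySem.Dict.getD PySem.Dict.get?
  by_cases h1 : t = "plus".toList
  · simp [h1, List.find?]
  · by_cases h2 : t = "divided".toList
    · simp [h2, List.find?]
    · by_cases h3 : t = "times".toList
      · simp [h3, List.find?]
      · by_cases h4 : t = "multipliedby".toList
        · simp [h4, List.find?]
        · by_cases h5 : t = "power".toList
          · simp [h5, List.find?]
          · by_cases h6 : t = "minus".toList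
            · simp [h6, List.find?]
            · have e : ∀ (k : List Char), ¬ t = k → (k == t) = false := by
                intro k hk
                simp only [beq_eq_false_iff_ne, ne_eq]
                exact fun hh => hk hh.symm
              have e1 : ((['p', 'l', 'u', 's'] : List Char) == t) = false := e _ h1
              have e2 : ((['d', 'i', 'v', 'i', 'd', 'e', 'd'] : List Char) == t) = false := e _ h2
              have e3 : ((['t', 'i', 'm', 'e', 's'] : List Char) == t) = false := e _ h3
              have e4 : ((['m', 'u', 'l', 't', 'i', 'p', 'l', 'i', 'e', 'd', 'b', 'y'] : List Char) == t) = false := e _ h4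
              have e5 : ((['p', 'o', 'w', 'e', 'r'] : List Char) == t) = false := e _ h5
              have e6 : ((['m', 'i', 'n', 'u', 's'] : List Char) == t) = false := e _ h6
              have f1 : ¬ t = (['p', 'l', 'u', 's'] : List Char) := h1
              have f2 : ¬ t = (['d', 'i', 'v', 'i', 'd', 'e', 'd'] : List Char) := h2
              have f3 : ¬ t = (['t', 'i', 'm', 'e', 's'] : List Char) := h3
              have f4 : ¬ t = (['m', 'u', 'l', 't', 'i', 'p', 'l', 'i', 'e', 'd', 'b', 'y'] : List Char) := h4
              have f5 : ¬ t = (['p', 'o', 'w', 'e', 'r'] : List Char) := h5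
              have f6 : ¬ t = (['m', 'i', 'n', 'u', 's'] : List Char) := h6
              have f7 : ¬ (t = (['b', 'y'] : List Char) ∨ t = ['t', 'o'] ∨ t = ['t', 'h', 'e'] ∨ t = ['o', 'f']) := by
                intro hh
                exact h (by simpa using hh)
              simp [e1, e2, e3, e4, e5, e6, f1, f2, f3, f4, f5, f6, f7]

-- the symbols branches agree
theorem pv_symbols (s : List Char) :
    String.ofList (s.foldl (fun equation i =>
        if !(PySem.Chars.isIn [i] ("what is ".toList)) then
          let char := i
          if char = '^' then equation ++ "**".toList else equation ++ [char]
        else equation) [])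
      = PySem.Str.join "" ((s.filter
          (fun i => !(PySem.Chars.isIn [i] ("what is ".toList)))).map
        (fun i => if i = '^' then "**" else String.ofList [i])) := by
  have hf : s.foldl (fun equation i =>
        if !(PySem.Chars.isIn [i] ("what is ".toList)) then
          let char := i
          if char = '^' then equation ++ "**".toList else equation ++ [char]
        else equation) []
      = s.foldl (fun e i =>
          if !(PySem.Chars.isIn [i] ("what is ".toList)) then
            e ++ (if i = '^' then "**".toList else [i]) else e) [] := by
    apply List.foldl_ext
    intro e i _
    by_cases h : PySem.Chars.isIn [i] (['w', 'h', 'a', 't', ' ', 'i', 's', ' '] : List Char) = true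
    · simp [h]
    · rw [Bool.not_eq_true] at h
      by_cases hc : i = '^' <;> simp [h, hc]
  rw [hf, pv_foldl_if]
  unfold PySem.Str.join
  congr 1
  rw [show "".toList = ([] : List Char) from rfl]
  rw [pv_join_nil_sep, List.nil_append, List.map_map]
  congr 1
  apply List.map_congr_left
  intro i _
  by_cases hc : i = '^' <;> simp [hc]

-- the words branches agree
theorem pv_words (s : List Char) :
    String.ofList ((PySem.Chars.split₀
        ((PySem.Chars.split₀ s).foldl (fun equation i =>
          if i = "what".toList ∨ i = "is".toList then equation
          else equation ++ " ".toList ++ i) [])).foldl (fun equation part =>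
        if part = "plus".toList then equation ++ "+".toList
        else if part = "divided".toList then equation ++ "/".toList
        else if part = "times".toList ∨ part = "multipliedby".toList then equation ++ "*".toList
        else if part = "power".toList then equation ++ "**".toList
        else if part = "minus".toList then equation ++ "-".toList
        else if part ∈ ["by".toList, "to".toList, "the".toList, "of".toList] then equation
        else equation ++ part) [])
      = PySem.Str.join "" (((PySem.Chars.split₀ s).filter
          (fun tok => !(PySem.Set.contains pvSkip tok))).map
        (fun tok => String.ofList (pvOps.getD tok tok))) := by
  set l₀ := PySem.Chars.split₀ s with hl₀
  set p1 : List Char → Bool := fun t => !(decide (t = "what".toList ∨ t = "is".toList)) with hp1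
  -- first pass builds the flattened space-prefixed filtered tokens
  have h1 : l₀.foldl (fun equation i =>
        if i = "what".toList ∨ i = "is".toList then equation
        else equation ++ " ".toList ++ i) []
      = ((l₀.filter p1).map (fun t => ' ' :: t)).flatten := by
    have : l₀.foldl (fun equation i =>
          if i = "what".toList ∨ i = "is".toList then equation
          else equation ++ " ".toList ++ i) []
        = l₀.foldl (fun e t => if p1 t then e ++ (' ' :: t) else e) [] := by
      apply List.foldl_ext
      intro e t _
      simp only [hp1, Bool.not_eq_true', decide_eq_false_iff_not, not_or]
      by_cases hA : t = "what".toList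
      · rw [if_pos (Or.inl hA), if_neg (by tauto)]
      · by_cases hB : t = "is".toList
        · rw [if_pos (Or.inr hB), if_neg (by tauto)]
        · rw [if_neg (by tauto), if_pos ⟨hA, hB⟩]
          simp
    rw [this, pv_foldl_if, List.nil_append]
  rw [h1]
  -- re-splitting recovers the filtered tokens
  have hgood : ∀ t ∈ l₀.filter p1, t ≠ [] ∧ ∀ c ∈ t, PySem.Chars.isspace c = false :=
    fun t ht => pv_split_good s t (List.mem_of_mem_filter ht)
  rw [pv_split_flat _ hgood]
  -- second pass is the flattened pvPiece map
  have h2 : (l₀.filter p1).foldl (fun equation part =>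
        if part = "plus".toList then equation ++ "+".toList
        else if part = "divided".toList then equation ++ "/".toList
        else if part = "times".toList ∨ part = "multipliedby".toList then equation ++ "*".toList
        else if part = "power".toList then equation ++ "**".toList
        else if part = "minus".toList then equation ++ "-".toList
        else if part ∈ ["by".toList, "to".toList, "the".toList, "of".toList] then equation
        else equation ++ part) []
      = ((l₀.filter p1).map pvPiece).flatten := by
    have : ∀ (l : List (List Char)), l.foldl (fun equation part =>
          if part = "plus".toList then equation ++ "+".toList
          else if part = "divided".toList then equation ++ "/".toList
          else if part = "times".toList ∨ part = "multipliedby".toList then equation ++ "*".toList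
          else if part = "power".toList then equation ++ "**".toList
          else if part = "minus".toList then equation ++ "-".toList
          else if part ∈ ["by".toList, "to".toList, "the".toList, "of".toList] then equation
          else equation ++ part) []
        = l.foldl (fun e part => e ++ pvPiece part) [] := by
      intro l
      apply List.foldl_ext
      intro e part _
      unfold pvPiece
      split_ifs <;> simp
    rw [this, pv_foldl_app, List.nil_append]
  rw [h2]
  -- drop the pieces that contribute []
  set q : List Char → Bool :=
    fun t => !(decide (t ∈ ["by".toList, "to".toList, "the".toList, "of".toList])) with hq
  have h3 : ((l₀.filter p1).map pvPiece).flatten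
      = (((l₀.filter p1).filter q).map pvPiece).flatten := by
    apply pv_flatten_filter
    intro t ht
    have hmem : t ∈ (["by".toList, "to".toList, "the".toList, "of".toList] : List (List Char)) := by
      have hd := ht
      rw [hq] at hd
      by_cases hx : t ∈ (["by".toList, "to".toList, "the".toList, "of".toList] : List (List Char))
      · exact hx
      · exfalso
        have hx1 : ¬ t = (['b', 'y'] : List Char) := fun hh => hx (by simp [hh])
        have hx2 : ¬ t = (['t', 'o'] : List Char) := fun hh => hx (by simp [hh])
        have hx3 : ¬ t = (['t', 'h', 'e'] : List Char) := fun hh => hx (by simp [hh])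
        have hx4 : ¬ t = (['o', 'f'] : List Char) := fun hh => hx (by simp [hh])
        simp at hd
        exact hx4 (hd hx1 hx2 hx3)
    fin_cases hmem <;> decide
  rw [h3, List.filter_filter]
  -- B's filter predicate is the conjunction
  have h4 : l₀.filter (fun a => q a && p1 a)
      = l₀.filter (fun tok => !(PySem.Set.contains pvSkip tok)) := by
    apply List.filter_congr
    intro t _
    rw [pv_skip_split]
    simp [hp1, hq, Bool.and_comm]
  rw [h4]
  -- pointwise, pvPiece is the dict lookup
  unfold PySem.Str.join
  congr 1
  rw [show "".toList = ([] : List Char) from rfl]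
  rw [pv_join_nil_sep, List.map_map]
  congr 1
  apply List.map_congr_left
  intro t ht
  have hmem : ¬ t ∈ ["by".toList, "to".toList, "the".toList, "of".toList] := by
    have := List.of_mem_filter ht
    rw [pv_skip_split] at this
    simp only [Bool.and_eq_true, Bool.not_eq_true', decide_eq_false_iff_not] at this
    exact this.2
  simp [pv_piece_eq_getD t hmem]

-- ===== VERDICT (by name: the statement is the Claim_ definition above) =====
theorem reformatSentence_spec : Claim_equal_reformatSentence := by
  intro sentence operatorType _
  unfold Spec_reformatSentence reformatSentence reformatSentence_alt
  by_cases hs : operatorType = "symbols"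
  · simp only [hs, if_true]
    exact pv_symbols sentence.toList
  · by_cases hw : operatorType = "words"
    · rw [if_neg hs, if_neg hs, if_pos hw, if_pos hw]
      exact pv_words sentence.toList
    · simp [hs, hw]
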